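-- pv_equiv track=rewrite | github.com/shruti-srivastava86/hotel-automation | hotel_auto/utils.py | check_power_consuption
-- ===== SOURCE A (Python) =====
-- def check_power_consuption(hotel, floors_list, main_corridor_list, sub_corridor_list):
--     main_corridors = len(floors_list)*len(main_corridor_list)
--     sub_corridors = len(floors_list)*len(sub_corridor_list)
--     total_allowable_power = (15*main_corridors) + (10*sub_corridors)
--     power_consumed = 0
--     for floors in hotel:
--         for corridors in hotel[floors]:
--             if hotel[floors][corridors]['light']:
--                 power_consumed += 5
--             if hotel[floors][corridors]['AC']:
--                 power_consumed += 10
--     if power_consumed > total_allowable_power: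
--         for floors in hotel:
--             for keys in hotel[floors]:
--                 if 'sub_corridors' in keys:
--                     if hotel[floors][keys]['AC']:
--                         hotel[floors][keys]['AC'] = False
--     return hotel
-- ===== SOURCE B (Python) =====
-- def check_power_consuption(hotel, floors_list, main_corridor_list, sub_corridor_list):
--     # Single fused pass: accumulate the power total and, at the same time, build the
--     # "capped" copy of the hotel (every sub-corridor with AC off); pick one at the end.
--     # Equivalence is about the return value only (A mutates hotel in place, B does not).
--     limit = len(floors_list) * (15 * len(main_corridor_list) + 10 * len(sub_corridor_list))
--     power = 0
--     capped = {}
--     for fname, floor in hotel.items():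
--         new_floor = {}
--         for cname, room in floor.items():
--             power += 5 * room['light'] + 10 * room['AC']
--             new_floor[cname] = dict(room, AC=False) if 'sub_corridors' in cname else room
--         capped[fname] = new_floor
--     return capped if power > limit else hotel
-- ===== Notes on version B (the rewrite author's own statement) =====
-- stated objective: alternative
-- what changed: Fuses A's two staged traversals (sum power over the nested dicts, then re-walk the whole structure mutating sub-corridor ACs) into one pass that simultaneously accumulates the power total and builds a fresh capped copy of the hotel, then simply selects which of the two structures to return; equivalence is about the return value only (A mutates in place, B does not).
-- outside the precondition, e.g. on check_power_consuption({'f': {'sub_corridors_1': {'light': True}}}, [1], [], [1]): A raises KeyError, B raises KeyError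
import Mathlib
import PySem

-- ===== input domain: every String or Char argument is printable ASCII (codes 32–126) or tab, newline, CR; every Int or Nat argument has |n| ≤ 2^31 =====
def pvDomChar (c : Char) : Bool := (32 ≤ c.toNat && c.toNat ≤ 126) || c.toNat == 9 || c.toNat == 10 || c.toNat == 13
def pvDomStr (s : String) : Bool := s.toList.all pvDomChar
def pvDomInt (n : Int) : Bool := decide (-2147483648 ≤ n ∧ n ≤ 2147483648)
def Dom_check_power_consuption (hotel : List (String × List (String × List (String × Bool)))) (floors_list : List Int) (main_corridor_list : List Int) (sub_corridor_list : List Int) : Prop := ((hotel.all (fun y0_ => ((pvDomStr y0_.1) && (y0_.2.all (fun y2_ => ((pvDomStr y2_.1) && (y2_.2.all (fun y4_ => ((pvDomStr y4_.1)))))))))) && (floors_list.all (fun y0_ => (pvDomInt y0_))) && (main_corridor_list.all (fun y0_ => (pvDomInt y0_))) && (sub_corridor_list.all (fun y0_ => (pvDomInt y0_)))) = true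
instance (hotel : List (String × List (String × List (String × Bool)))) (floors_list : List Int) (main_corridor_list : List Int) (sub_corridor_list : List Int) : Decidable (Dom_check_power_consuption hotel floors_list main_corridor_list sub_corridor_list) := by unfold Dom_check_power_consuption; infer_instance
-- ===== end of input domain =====

-- B fuses A's two staged traversals into ONE pass that accumulates the power total while building a
-- fresh capped copy, then selects which structure to return; equivalence is about the RETURN value
-- only (Python A mutates hotel in place, B does not).

-- ===== PORT A =====
-- room[k] as Python dict lookup; the default is never used inside Pre_ (Pre_ requires the key present;
-- Python raises KeyError otherwise)
def pvRoomGet (room : List (String × Bool)) (k : String) : Bool :=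
  (PySem.Dict.mk room).getD k false

def check_power_consuption (hotel : List (String × List (String × List (String × Bool)))) (floors_list : List Int) (main_corridor_list : List Int) (sub_corridor_list : List Int) : List (String × List (String × List (String × Bool))) :=
  let main_corridors : Int := (floors_list.length : Int) * (main_corridor_list.length : Int)
  let sub_corridors : Int := (floors_list.length : Int) * (sub_corridor_list.length : Int)
  let total_allowable_power : Int := 15 * main_corridors + 10 * sub_corridors
  let power_consumed : Int :=
    hotel.foldl (fun acc floors =>
      floors.2.foldl (fun acc corridors =>
        let acc1 := if pvRoomGet corridors.2 "light" then acc + 5 else acc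
        if pvRoomGet corridors.2 "AC" then acc1 + 10 else acc1) acc) 0
  if power_consumed > total_allowable_power then
    hotel.map (fun floors => (floors.1,
      floors.2.map (fun kv =>
        if PySem.Str.isIn "sub_corridors" kv.1 then
          if pvRoomGet kv.2 "AC" then
            (kv.1, kv.2.map (fun e => if e.1 == "AC" then (e.1, false) else e))
          else kv
        else kv)))
  else hotel

-- ===== PORT B =====
-- 5 * room['light'] + 10 * room['AC'] (Python bool arithmetic)
def pvRoomPower (room : List (String × Bool)) : Int :=
  5 * (if (PySem.Dict.mk room).getD "light" false then (1 : Int) else 0)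
    + 10 * (if (PySem.Dict.mk room).getD "AC" false then (1 : Int) else 0)

-- dict(room, AC=False): copy of the dict with 'AC' overwritten in place
def pvAcOff (room : List (String × Bool)) : List (String × Bool) :=
  ((PySem.Dict.mk room).insert "AC" false).items

def check_power_consuption_alt (hotel : List (String × List (String × List (String × Bool)))) (floors_list : List Int) (main_corridor_list : List Int) (sub_corridor_list : List Int) : List (String × List (String × List (String × Bool))) :=
  let limit : Int := (floors_list.length : Int) *
      (15 * (main_corridor_list.length : Int) + 10 * (sub_corridor_list.length : Int))
  let st :=
    hotel.foldl (fun st fl =>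
      let inner :=
        fl.2.foldl (fun st2 nr =>
          (st2.1 + pvRoomPower nr.2,
           st2.2.insert nr.1
             (if PySem.Str.isIn "sub_corridors" nr.1 then pvAcOff nr.2 else nr.2)))
          (st.1, (PySem.Dict.empty : PySem.Dict String (List (String × Bool))))
      (inner.1, st.2.insert fl.1 inner.2.items))
      ((0 : Int), (PySem.Dict.empty : PySem.Dict String (List (String × List (String × Bool)))))
  if st.1 > limit then st.2.items else hotel

-- ===== PRECONDITION & SPEC =====
-- Pre_ excludes association lists with duplicate keys at any dict level (a Python dict cannot hold them:
-- A's value there reflects the collapsed dict, not the listed input) and rooms lacking a 'light' or 'AC'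
-- key, on which A raises KeyError.
def Pre_check_power_consuption (hotel : List (String × List (String × List (String × Bool)))) (floors_list : List Int) (main_corridor_list : List Int) (sub_corridor_list : List Int) : Prop :=
  (hotel.map Prod.fst).Nodup ∧
  ∀ fl ∈ hotel, (fl.2.map Prod.fst).Nodup ∧
    ∀ c ∈ fl.2, (c.2.map Prod.fst).Nodup ∧
      "light" ∈ c.2.map Prod.fst ∧ "AC" ∈ c.2.map Prod.fst
instance (hotel : List (String × List (String × List (String × Bool)))) (floors_list : List Int) (main_corridor_list : List Int) (sub_corridor_list : List Int) : Decidable (Pre_check_power_consuption hotel floors_list main_corridor_list sub_corridor_list) := by unfold Pre_check_power_consuption; infer_instance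

def pvWitness_check_power_consuption : (List (String × List (String × List (String × Bool)))) × List Int × List Int × List Int :=
  ([("floor_1", [("main_corridors_1", [("light", true), ("AC", true)]),
                 ("sub_corridors_1", [("light", false), ("AC", true)])])], [1], [1], [1])

def Spec_check_power_consuption (hotel : List (String × List (String × List (String × Bool)))) (floors_list : List Int) (main_corridor_list : List Int) (sub_corridor_list : List Int) (out : List (String × List (String × List (String × Bool)))) : Prop := out = check_power_consuption_alt hotel floors_list main_corridor_list sub_corridor_list
instance (hotel : List (String × List (String × List (String × Bool)))) (floors_list : List Int) (main_corridor_list : List Int) (sub_corridor_list : List Int) (out : List (String × List (String × List (String × Bool)))) : Decidable (Spec_check_power_consuption hotel floors_list main_corridor_list sub_corridor_list out) := by unfold Spec_check_power_consuption; infer_instance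

-- ===== CLAIM =====
def Claim_equal_check_power_consuption : Prop := ∀ (hotel : List (String × List (String × List (String × Bool)))) (floors_list : List Int) (main_corridor_list : List Int) (sub_corridor_list : List Int), Dom_check_power_consuption hotel floors_list main_corridor_list sub_corridor_list → Pre_check_power_consuption hotel floors_list main_corridor_list sub_corridor_list → Spec_check_power_consuption hotel floors_list main_corridor_list sub_corridor_list (check_power_consuption hotel floors_list main_corridor_list sub_corridor_list)

-- ===== LEMMAS AND PROOFS =====

-- A pair-state foldl whose components do not interact splits into two foldls.
theorem pv_foldl_pair {α β δ : Type} (l : List α) (f : β → α → β) (g : δ → α → δ)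
    (p : β) (d : δ) :
    l.foldl (fun st a => (f st.1 a, g st.2 a)) (p, d) = (l.foldl f p, l.foldl g d) := by
  induction l generalizing p d with
  | nil => rfl
  | cons h t ih => simp [List.foldl_cons, ih]

-- A's inner accumulator loop over the corridors of one floor adds exactly the per-room powers.
theorem pv_floor_power (l : List (String × List (String × Bool))) (acc : Int) :
    l.foldl (fun acc corridors =>
        let acc1 := if pvRoomGet corridors.2 "light" then acc + 5 else acc
        if pvRoomGet corridors.2 "AC" then acc1 + 10 else acc1) acc
      = acc + (l.map (fun nr => pvRoomPower nr.2)).sum := by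
  induction l generalizing acc with
  | nil => simp
  | cons h t ih =>
    simp only [List.foldl_cons, List.map_cons, List.sum_cons, ih]
    unfold pvRoomGet pvRoomPower
    split_ifs <;> ring

-- On a room with unique keys containing "AC", A's conditional in-place rewrite equals B's dict overwrite.
theorem pv_room_update (room : List (String × Bool))
    (hnd : (room.map Prod.fst).Nodup) (hmem : "AC" ∈ room.map Prod.fst) :
    (if pvRoomGet room "AC" then room.map (fun e => if e.1 == "AC" then (e.1, false) else e)
     else room) = pvAcOff room := by
  have hcont : (PySem.Dict.mk room).contains "AC" = true := by
    rw [PySem.Dict.contains_iff_mem_keys]; simpa [PySem.Dict.keys] using hmem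
  have hitems : pvAcOff room = room.map (fun p => if p.1 == "AC" then ("AC", false) else p) := by
    unfold pvAcOff
    rw [PySem.Dict.items_insert_of_contains _ _ hcont]
  rw [hitems]
  by_cases hac : pvRoomGet room "AC"
  · rw [if_pos hac]
    refine List.map_congr_left (fun e _ => ?_)
    by_cases he : e.1 = "AC" <;> simp [he]
  · rw [if_neg hac]
    have hid : ∀ e ∈ room, (if e.1 == "AC" then (("AC" : String), false) else e) = e := by
      intro e hme
      by_cases he : e.1 = "AC"
      · have hget : (PySem.Dict.mk room).get? "AC" = some e.2 := by
          apply PySem.Dict.get?_of_mem_items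
          · show ("AC", e.2) ∈ room
            have : e = ("AC", e.2) := by cases e; simp_all
            rwa [← this]
          · simpa [PySem.Dict.keys] using hnd
        have hfalse : e.2 = false := by
          have := hac
          unfold pvRoomGet at this
          rw [PySem.Dict.getD_eq_get?_getD, hget] at this
          simpa using this
        have : e = ("AC", false) := by cases e; simp_all
        simp [this]
      · simp [he]
    rw [List.map_congr_left hid]
    simp

-- B's inner fold over one floor with nodup corridor names: the pair state splits into the power sum
-- and the fresh-key dict insertions, which produce exactly the mapped items list.
theorem pv_inner_fold (l : List (String × List (String × Bool))) (p : Int)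
    (hnd : (l.map Prod.fst).Nodup) :
    l.foldl (fun st2 nr =>
        (st2.1 + pvRoomPower nr.2,
         st2.2.insert nr.1
           (if PySem.Str.isIn "sub_corridors" nr.1 then pvAcOff nr.2 else nr.2)))
      (p, (PySem.Dict.empty : PySem.Dict String (List (String × Bool))))
    = (p + (l.map (fun nr => pvRoomPower nr.2)).sum,
       PySem.Dict.mk (l.map (fun nr =>
         (nr.1, if PySem.Str.isIn "sub_corridors" nr.1 then pvAcOff nr.2 else nr.2)))) := by
  have hpair := pv_foldl_pair l (fun q nr => q + pvRoomPower nr.2)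
    (fun d nr => d.insert nr.1
      (if PySem.Str.isIn "sub_corridors" nr.1 then pvAcOff nr.2 else nr.2))
    p (PySem.Dict.empty : PySem.Dict String (List (String × Bool)))
  rw [hpair]
  refine Prod.ext ?_ ?_
  · show l.foldl (fun q nr => q + pvRoomPower nr.2) p = _
    rw [PySem.List.foldl_add]
  · show l.foldl (fun d nr => d.insert nr.1
        (if PySem.Str.isIn "sub_corridors" nr.1 then pvAcOff nr.2 else nr.2))
        PySem.Dict.empty = _
    apply PySem.Dict.ext
    exact (PySem.Dict.items_foldl_insert_fresh l Prod.fst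
      (fun nr => if PySem.Str.isIn "sub_corridors" nr.1 then pvAcOff nr.2 else nr.2)
      PySem.Dict.empty (fun a _ => rfl) hnd).trans (List.nil_append _)

-- B's outer fold from any pair state (p, d) whose dict is fresh for every floor name: it accumulates
-- the hotel power total and appends the capped floors to d's items.
theorem pv_outer_fold (hotel : List (String × List (String × List (String × Bool))))
    (p : Int) (d : PySem.Dict String (List (String × List (String × Bool))))
    (h : ∀ f ∈ hotel, (f.2.map Prod.fst).Nodup)
    (hh : (hotel.map Prod.fst).Nodup)
    (hfresh : ∀ f ∈ hotel, d.contains f.1 = false) :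
    hotel.foldl (fun st fl =>
      let inner :=
        fl.2.foldl (fun st2 nr =>
          (st2.1 + pvRoomPower nr.2,
           st2.2.insert nr.1
             (if PySem.Str.isIn "sub_corridors" nr.1 then pvAcOff nr.2 else nr.2)))
          (st.1, (PySem.Dict.empty : PySem.Dict String (List (String × Bool))))
      (inner.1, st.2.insert fl.1 inner.2.items))
      (p, d)
    = (p + (hotel.map (fun fl => (fl.2.map (fun nr => pvRoomPower nr.2)).sum)).sum,
       PySem.Dict.mk (d.items ++ hotel.map (fun fl => (fl.1, fl.2.map (fun nr =>
         (nr.1, if PySem.Str.isIn "sub_corridors" nr.1 then pvAcOff nr.2 else nr.2)))))) := by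
  induction hotel generalizing p d with
  | nil =>
    refine Prod.ext (by simp) (PySem.Dict.ext (by simp))
  | cons hd t ih =>
    have hhd : (hd.2.map Prod.fst).Nodup := h hd (List.mem_cons_self ..)
    have hh' := hh
    rw [List.map_cons] at hh'
    have hcons := List.nodup_cons.mp hh'
    have hdc : d.contains hd.1 = false := hfresh hd (List.mem_cons_self ..)
    rw [List.foldl_cons]
    simp only [pv_inner_fold hd.2 p hhd]
    rw [ih (p + (hd.2.map (fun nr => pvRoomPower nr.2)).sum)
        (d.insert hd.1 ((PySem.Dict.mk (hd.2.map (fun nr =>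
          (nr.1, if PySem.Str.isIn "sub_corridors" nr.1 then pvAcOff nr.2 else nr.2)))).items))
        (fun f hf => h f (List.mem_cons_of_mem _ hf))
        hcons.2
        (fun f hf => by
          rw [PySem.Dict.contains_insert]
          have hne : (f.1 == hd.1) = false := by
            have : f.1 ∈ t.map Prod.fst := List.mem_map_of_mem hf
            have : f.1 ≠ hd.1 := fun he => hcons.1 (he ▸ this)
            simpa using this
          rw [hne, hfresh f (List.mem_cons_of_mem _ hf), Bool.or_self])]
    refine Prod.ext ?_ (PySem.Dict.ext ?_)
    · simp only [List.map_cons, List.sum_cons]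
      show p + _ + _ = p + (_ + _)
      ring
    · show (d.insert hd.1 _).items ++ _ = d.items ++ _
      rw [PySem.Dict.items_insert_of_not_contains _ _ hdc, List.map_cons,
        List.append_assoc, List.singleton_append]

-- A's outer accumulator loop sums the per-floor power sums.
theorem pv_hotel_power (hotel : List (String × List (String × List (String × Bool)))) (acc : Int) :
    hotel.foldl (fun acc floors =>
        floors.2.foldl (fun acc corridors =>
          let acc1 := if pvRoomGet corridors.2 "light" then acc + 5 else acc
          if pvRoomGet corridors.2 "AC" then acc1 + 10 else acc1) acc) acc
      = acc + (hotel.map (fun fl => (fl.2.map (fun nr => pvRoomPower nr.2)).sum)).sum := by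
  induction hotel generalizing acc with
  | nil => simp
  | cons h t ih =>
    rw [List.foldl_cons, pv_floor_power, ih, List.map_cons, List.sum_cons]
    ring

-- ===== VERDICT =====
theorem check_power_consuption_spec : Claim_equal_check_power_consuption := by
  intro hotel floors_list main_corridor_list sub_corridor_list _ hpre
  obtain ⟨hhnd, hflr⟩ := hpre
  unfold Spec_check_power_consuption check_power_consuption check_power_consuption_alt
  rw [pv_outer_fold hotel 0 PySem.Dict.empty (fun f hf => (hflr f hf).1) hhnd (fun f _ => rfl)]
  simp only [pv_hotel_power, zero_add]
  have hlim : (15 : Int) * ((floors_list.length : Int) * (main_corridor_list.length : Int))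
      + 10 * ((floors_list.length : Int) * (sub_corridor_list.length : Int))
      = (floors_list.length : Int) *
        (15 * (main_corridor_list.length : Int) + 10 * (sub_corridor_list.length : Int)) := by ring
  rw [hlim]
  by_cases hgt : (hotel.map (fun fl => (fl.2.map (fun nr => pvRoomPower nr.2)).sum)).sum >
      (floors_list.length : Int) *
        (15 * (main_corridor_list.length : Int) + 10 * (sub_corridor_list.length : Int))
  · rw [if_pos hgt, if_pos hgt]
    refine List.map_congr_left (fun f hfmem => ?_)
    obtain ⟨_, hc⟩ := hflr f hfmem
    refine congrArg _ (List.map_congr_left (fun c hcmem => ?_))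
    obtain ⟨hnd, _, hac⟩ := hc c hcmem
    by_cases hsub : PySem.Str.isIn "sub_corridors" c.1
    · rw [if_pos hsub, if_pos hsub]
      have hru := pv_room_update c.2 hnd hac
      by_cases hon : pvRoomGet c.2 "AC"
      · rw [if_pos hon] at hru
        rw [if_pos hon]
        exact Prod.ext rfl hru
      · rw [if_neg hon] at hru
        rw [if_neg hon]
        exact Prod.ext rfl hru
    · rw [if_neg hsub, if_neg hsub]
  · rw [if_neg hgt, if_neg hgt]
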